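-- pv_equiv track=rewrite | github.com/BloomDlwlrma/qm9_reaction_eng | qm9_orca_work/qm9_orca_work_mole/run_batch_manager.py | get_cpu_ranges
-- ===== SOURCE A (Python) =====
-- def get_cpu_ranges(total_cores, num_slots):
--     cores_per_slot = total_cores // num_slots
--     ranges = []
--     for i in range(num_slots):
--         start = i * cores_per_slot
--         end = total_cores - 1 if i == num_slots - 1 else (i + 1) * cores_per_slot - 1
--         ranges.append(f"{start}-{end}")
--     return ranges, cores_per_slot
-- ===== SOURCE B (Python) =====
-- def get_cpu_ranges(total_cores, num_slots):
--     cores_per_slot = total_cores // num_slots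
--     ranges = []
--     start = (num_slots - 1) * cores_per_slot
--     end = total_cores - 1
--     for _ in range(num_slots):
--         ranges.append(f"{start}-{end}")
--         end = start - 1
--         start -= cores_per_slot
--     ranges.reverse()
--     return ranges, cores_per_slot
-- ===== Notes on version B (the rewrite author's own statement) =====
-- stated objective: alternative
-- what changed: B builds the ranges back-to-front with two running cursors (each slot's end is the previous slot's start minus one, seeded at total_cores-1) and reverses at the end, so there is no per-index multiplication in the loop and no last-slot conditional.
import Mathlib
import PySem

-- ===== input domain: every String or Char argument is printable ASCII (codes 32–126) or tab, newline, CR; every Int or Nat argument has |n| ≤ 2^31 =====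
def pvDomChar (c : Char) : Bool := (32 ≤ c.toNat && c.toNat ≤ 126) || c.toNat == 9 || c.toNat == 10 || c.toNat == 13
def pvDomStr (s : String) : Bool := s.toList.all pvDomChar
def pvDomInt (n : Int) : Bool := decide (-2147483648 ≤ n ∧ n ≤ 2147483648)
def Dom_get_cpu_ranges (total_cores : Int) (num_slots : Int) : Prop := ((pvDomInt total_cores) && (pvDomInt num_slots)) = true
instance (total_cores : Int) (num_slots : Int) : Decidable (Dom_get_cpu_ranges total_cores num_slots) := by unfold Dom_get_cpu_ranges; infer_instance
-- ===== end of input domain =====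

-- B builds the ranges back-to-front with two running cursors and a final reverse, removing A's last-slot conditional and per-index multiplication (objective: alternative).


-- ===== PORT A =====
def get_cpu_ranges (total_cores : Int) (num_slots : Int) : List String × Int :=
  let cores_per_slot := PySem.Int.floordiv total_cores num_slots
  let ranges := (PySem.List.pyRange 0 num_slots 1).foldl (fun acc i =>
    let start := i * cores_per_slot
    let «end» := if i == num_slots - 1 then total_cores - 1 else (i + 1) * cores_per_slot - 1
    acc ++ [PySem.Int.toStr start ++ "-" ++ PySem.Int.toStr «end»]) []
  (ranges, cores_per_slot)

-- ===== PORT B =====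
def get_cpu_ranges_alt (total_cores : Int) (num_slots : Int) : List String × Int :=
  let cores_per_slot := PySem.Int.floordiv total_cores num_slots
  let st := (PySem.List.pyRange 0 num_slots 1).foldl (fun (st : List String × Int × Int) _ =>
    let ranges := st.1; let start := st.2.1; let «end» := st.2.2
    (ranges ++ [PySem.Int.toStr start ++ "-" ++ PySem.Int.toStr «end»], start - cores_per_slot, start - 1))
    ([], (num_slots - 1) * cores_per_slot, total_cores - 1)
  (st.1.reverse, cores_per_slot)

-- ===== PRECONDITION & SPEC =====
-- Pre_ excludes only num_slots = 0, where Python A raises ZeroDivisionError.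
def Pre_get_cpu_ranges (total_cores : Int) (num_slots : Int) : Prop := num_slots ≠ 0
instance (total_cores : Int) (num_slots : Int) : Decidable (Pre_get_cpu_ranges total_cores num_slots) := by unfold Pre_get_cpu_ranges; infer_instance
def pvWitness_get_cpu_ranges : Int × Int := (17, 4)
def Spec_get_cpu_ranges (total_cores : Int) (num_slots : Int) (out : List String × Int) : Prop := out = get_cpu_ranges_alt total_cores num_slots
instance (total_cores : Int) (num_slots : Int) (out : List String × Int) : Decidable (Spec_get_cpu_ranges total_cores num_slots out) := by unfold Spec_get_cpu_ranges; infer_instance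

-- ===== CLAIM (what is proved, stated in full; the proofs are below) =====
def Claim_equal_get_cpu_ranges : Prop := ∀ (total_cores : Int) (num_slots : Int), Dom_get_cpu_ranges total_cores num_slots → Pre_get_cpu_ranges total_cores num_slots → Spec_get_cpu_ranges total_cores num_slots (get_cpu_ranges total_cores num_slots)

-- ===== LEMMAS AND PROOFS =====

-- the list B's loop produces for k further iterations from cursors (s, e)
def pvGB (c : Int) : ℕ → Int → Int → List String
  | 0, _, _ => []
  | k + 1, s, e => (PySem.Int.toStr s ++ "-" ++ PySem.Int.toStr e) :: pvGB c k (s - c) (s - 1)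

theorem pvGB_length (c : Int) (k : ℕ) (s e : Int) : (pvGB c k s e).length = k := by
  induction k generalizing s e with
  | zero => rfl
  | succ k ih => simp [pvGB, ih]

-- B's foldl only depends on the length of the list it runs over, and produces pvGB
theorem pv_foldB (c : Int) (l : List Int) (acc : List String) (s e : Int) :
    (l.foldl (fun (st : List String × Int × Int) _ =>
      (st.1 ++ [PySem.Int.toStr st.2.1 ++ "-" ++ PySem.Int.toStr st.2.2],
       st.2.1 - c, st.2.1 - 1)) (acc, s, e)).1
    = acc ++ pvGB c l.length s e := by
  induction l generalizing acc s e with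
  | nil => simp [pvGB]
  | cons x xs ih =>
      simp only [List.foldl_cons, List.length_cons, pvGB]
      rw [ih]
      simp

theorem pvGB_getElem (c : Int) (k : ℕ) (s e : Int) (j : ℕ) (hj : j < k) :
    (pvGB c k s e)[j]'(by rw [pvGB_length]; exact hj)
      = (PySem.Int.toStr (s - (j : Int) * c) ++ "-" ++
         PySem.Int.toStr (if j = 0 then e else s - ((j : Int) - 1) * c - 1)) := by
  induction k generalizing s e j with
  | zero => omega
  | succ k ih =>
      cases j with
      | zero => simp [pvGB]
      | succ j =>
          have hj' : j < k := by omega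
          simp only [pvGB, List.getElem_cons_succ]
          rw [ih _ _ j hj']
          rcases Nat.eq_zero_or_pos j with h0 | hpos
          · subst h0; norm_num
          · have : j ≠ 0 := by omega
            simp only [this, if_false, Nat.succ_ne_zero]
            push_cast
            ring_nf

-- the two range lists coincide for any per-slot width c
theorem pv_ranges_eq (tc n c : Int) :
    (PySem.List.pyRange 0 n 1).foldl (fun acc i =>
      acc ++ [PySem.Int.toStr (i * c) ++ "-" ++
        PySem.Int.toStr (if i == n - 1 then tc - 1 else (i + 1) * c - 1)]) []
    = (pvGB c (PySem.List.pyRange 0 n 1).length ((n - 1) * c) (tc - 1)).reverse := by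
  rw [PySem.List.foldl_append_singleton_eq_map]
  by_cases hn : n ≤ 0
  · rw [PySem.List.pyRange_one_eq_nil (by omega)]
    simp [pvGB]
  · obtain ⟨k, rfl⟩ : ∃ k : ℕ, n = (k : Int) := ⟨n.toNat, by omega⟩
    have hk0 : 0 < k := by omega
    have hlen : (PySem.List.pyRange 0 (k : Int) 1).length = k := by
      simp [PySem.List.length_pyRange_one]
    apply List.ext_getElem
    · simp [hlen, pvGB_length]
    · intro i h1 h2
      have hi : i < k := by simpa [hlen] using h1
      simp only [List.nil_append, List.getElem_map, hlen]
      have hρ : (PySem.List.pyRange 0 (k : Int) 1)[i]'(by rw [hlen]; exact hi) = (i : Int) := by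
        have := PySem.List.getElem_pyRange_one (a := 0) (b := (k : Int)) (k := i)
          (by rw [hlen]; exact hi)
        simpa using this
      rw [hρ]
      rw [List.getElem_reverse]
      simp only [List.length_reverse, pvGB_length, hlen] at h2
      simp only [pvGB_length]
      rw [pvGB_getElem c k _ _ (k - 1 - i) (by omega)]
      rcases Nat.lt_or_ge (i + 1) k with hlt | hge
      · -- not the last slot
        have hne : ((i : Int) == (k : Int) - 1) = false := by
          simp only [beq_eq_false_iff_ne, ne_eq]; omega
        have hnz : k - 1 - i ≠ 0 := by omega
        simp only [hne, Bool.false_eq_true, if_false, hnz]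
        have h1' : ((k : Int) - 1) * c - ((k - 1 - i : ℕ) : Int) * c = (i : Int) * c := by
          push_cast [Nat.cast_sub (by omega : i ≤ k - 1)]
          ring_nf
          push_cast [Nat.cast_sub (by omega : 1 ≤ k)]
          ring
        have h2' : ((k : Int) - 1) * c - (((k - 1 - i : ℕ) : Int) - 1) * c - 1
            = ((i : Int) + 1) * c - 1 := by
          push_cast [Nat.cast_sub (by omega : i ≤ k - 1), Nat.cast_sub (by omega : 1 ≤ k)]
          ring
        rw [h1', h2']
      · -- last slot: i = k - 1
        have hieq : i = k - 1 := by omega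
        have hz : k - 1 - i = 0 := by omega
        have heq : ((i : Int) == (k : Int) - 1) = true := by
          simp only [beq_iff_eq]; omega
        have hic : (i : Int) = (k : Int) - 1 := by omega
        simp only [hz, hic]
        simp

-- ===== VERDICT (by name: the statement is the Claim_ definition above) =====
theorem get_cpu_ranges_spec : Claim_equal_get_cpu_ranges := by
  intro tc n _ _
  unfold Spec_get_cpu_ranges get_cpu_ranges get_cpu_ranges_alt
  simp only
  refine Prod.ext ?_ rfl
  rw [pv_foldB]
  simpa using pv_ranges_eq tc n (PySem.Int.floordiv tc n)
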